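-- pv_equiv track=rewrite | github.com/andivis/name-finder | program/other/name_finder.py | wordsInARowTheSame
-- ===== SOURCE A (Python) =====
-- def wordsInARowTheSame(words, toCompare, joinString, mustStartWith):
--     result = 0
--
--     toCompare = toCompare.lower()
--
--     # go from left to right
--     # try longest run first, then try smaller ones
--     for i in range(len(words), -1, -1):
--         line = joinString.join(words[0:i])
--
--         if mustStartWith:
--             if toCompare.startswith(line) and i > result:
--                 result = i
--                 break
--         else:
--             if line in toCompare and i > result:
--                 result = i
--                 break
--
--     if not result:
--         # go from right to left
--         for i in range(len(words), -1, -1):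
--             line = joinString.join(words[-i:len(words)])
--
--             if mustStartWith:
--                 if toCompare.startswith(line) and i > result:
--                     result = i
--                     break
--             else:
--                 if line in toCompare and i > result:
--                     result = i
--                     break
--
--     return result
-- ===== SOURCE B (Python) =====
-- def wordsInARowTheSame(words, toCompare, joinString, mustStartWith):
--     t = toCompare.lower()
--     def ok(line):
--         return t.startswith(line) if mustStartWith else line in t
--
--     # forward: a match of i joined words implies a match of the first i-1
--     # (the shorter join is a prefix), so grow the join once, left to right,
--     # and stop at the first failure
--     best = 0
--     line = ""
--     i = 1
--     for w in words:
--         line = w if i == 1 else line + joinString + w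
--         if not ok(line):
--             break
--         best = i
--         i += 1
--     if best:
--         return best
--
--     # backward: grow the suffix join once, right to left, keep the largest
--     # matching length (startswith is not monotone in this direction)
--     best = 0
--     line = ""
--     i = 1
--     for w in reversed(words):
--         line = w if i == 1 else w + joinString + line
--         if ok(line):
--             best = i
--         i += 1
--     return best
-- ===== Notes on version B (the rewrite author's own statement) =====
-- stated objective: faster
-- what changed: Instead of re-joining the whole slice for every candidate length in two descending scans, B grows each joined line incrementally by one word (forward: stop at the first failure, which is the maximum by prefix-monotonicity of the match; backward: one right-to-left pass tracking the largest matching length), so each direction builds O(total length) of string instead of O(n * total length).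
import Mathlib
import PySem

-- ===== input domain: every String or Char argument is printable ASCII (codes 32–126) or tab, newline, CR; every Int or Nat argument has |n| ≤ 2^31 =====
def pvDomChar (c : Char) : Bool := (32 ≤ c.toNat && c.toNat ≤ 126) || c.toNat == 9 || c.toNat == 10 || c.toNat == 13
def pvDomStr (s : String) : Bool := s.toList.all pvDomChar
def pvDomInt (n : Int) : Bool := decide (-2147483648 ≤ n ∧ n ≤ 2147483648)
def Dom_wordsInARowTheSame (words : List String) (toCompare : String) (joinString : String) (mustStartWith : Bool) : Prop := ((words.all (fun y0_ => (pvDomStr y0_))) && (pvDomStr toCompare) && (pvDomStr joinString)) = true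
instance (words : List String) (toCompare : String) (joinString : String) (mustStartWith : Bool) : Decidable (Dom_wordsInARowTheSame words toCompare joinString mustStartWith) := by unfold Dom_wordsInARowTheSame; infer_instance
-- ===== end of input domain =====

-- B replaces A's two descending rebuild-the-join-from-scratch scans by incremental one-word-at-a-time
-- join growth (forward: stop at first failure; backward: one right-to-left pass tracking the best),
-- so each direction builds O(total length) of string instead of O(n * total length).

-- ===== PORT A =====
-- first 'for i in range(len(words), -1, -1)' loop (returns at 'break', else falls through with result)
def wITRS_loop1 (words : List String) (toCompare : String) (joinString : String) (mustStartWith : Bool) : List Int → Int → Int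
  | [], result => result
  | i :: rest, result =>
    let line := PySem.Str.join joinString (PySem.List.slice words (some 0) (some i))
    if mustStartWith then
      if PySem.Str.startswith toCompare line && decide (result < i) then i
      else wITRS_loop1 words toCompare joinString mustStartWith rest result
    else
      if PySem.Str.isIn line toCompare && decide (result < i) then i
      else wITRS_loop1 words toCompare joinString mustStartWith rest result

-- second loop: line = joinString.join(words[-i:len(words)])
def wITRS_loop2 (words : List String) (toCompare : String) (joinString : String) (mustStartWith : Bool) : List Int → Int → Int
  | [], result => result
  | i :: rest, result =>
    let line := PySem.Str.join joinString (PySem.List.slice words (some (-i)) (some ((words.length : Int))))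
    if mustStartWith then
      if PySem.Str.startswith toCompare line && decide (result < i) then i
      else wITRS_loop2 words toCompare joinString mustStartWith rest result
    else
      if PySem.Str.isIn line toCompare && decide (result < i) then i
      else wITRS_loop2 words toCompare joinString mustStartWith rest result

def wordsInARowTheSame (words : List String) (toCompare : String) (joinString : String) (mustStartWith : Bool) : Int :=
  let toCompareL := PySem.Str.lower toCompare
  let result := wITRS_loop1 words toCompareL joinString mustStartWith (PySem.List.pyRange ((words.length : Int)) (-1) (-1)) 0
  if result == 0 then
    wITRS_loop2 words toCompareL joinString mustStartWith (PySem.List.pyRange ((words.length : Int)) (-1) (-1)) 0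
  else result

-- ===== PORT B =====
-- Source B's ok(line): t.startswith(line) if mustStartWith else line in t  (on char lists)
def pvOk (mustStartWith : Bool) (t line : List Char) : Bool :=
  if mustStartWith then PySem.Chars.startswith t line else PySem.Chars.isIn line t

-- forward pass of Source B: grow the join, break at the first failure
def pvFwd (t j : List Char) (msw : Bool) : List (List Char) → Nat → List Char → Int → Int
  | [], _, _, best => best
  | w :: rest, i, line, best =>
    let line' := if i == 1 then w else line ++ j ++ w
    if !(pvOk msw t line') then best
    else pvFwd t j msw rest (i + 1) line' (i : Int)

-- backward pass of Source B: 'for w in reversed(words)', keep the largest matching i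
def pvBwd (t j : List Char) (msw : Bool) : List (List Char) → Nat → List Char → Int → Int
  | [], _, _, best => best
  | w :: rest, i, line, best =>
    let line' := if i == 1 then w else w ++ j ++ line
    pvBwd t j msw rest (i + 1) line' (if pvOk msw t line' then (i : Int) else best)

def wordsInARowTheSame_alt (words : List String) (toCompare : String) (joinString : String) (mustStartWith : Bool) : Int :=
  let t := PySem.Chars.lower toCompare.toList
  let j := joinString.toList
  let ws := words.map String.toList
  let best := pvFwd t j mustStartWith ws 1 [] 0
  if best ≠ 0 then best
  else pvBwd t j mustStartWith ws.reverse 1 [] 0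

-- ===== PRECONDITION & SPEC =====
def Spec_wordsInARowTheSame (words : List String) (toCompare : String) (joinString : String) (mustStartWith : Bool) (out : Int) : Prop := out = wordsInARowTheSame_alt words toCompare joinString mustStartWith
instance (words : List String) (toCompare : String) (joinString : String) (mustStartWith : Bool) (out : Int) : Decidable (Spec_wordsInARowTheSame words toCompare joinString mustStartWith out) := by unfold Spec_wordsInARowTheSame; infer_instance

-- ===== CLAIM (what is proved, stated in full; the proofs are below) =====
def Claim_equal_wordsInARowTheSame : Prop := ∀ (words : List String) (toCompare : String) (joinString : String) (mustStartWith : Bool), Dom_wordsInARowTheSame words toCompare joinString mustStartWith → Spec_wordsInARowTheSame words toCompare joinString mustStartWith (wordsInARowTheSame words toCompare joinString mustStartWith)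

-- ===== LEMMAS AND PROOFS =====

-- match predicate for the first i joined words / the last i joined words
def pvPf (t j : List Char) (msw : Bool) (cws : List (List Char)) (k : Nat) : Bool :=
  pvOk msw t (PySem.Chars.join j (cws.take k))
def pvPs (t j : List Char) (msw : Bool) (cws : List (List Char)) (k : Nat) : Bool :=
  pvOk msw t (PySem.Chars.join j (cws.drop (cws.length - k)))

-- greatest i in [1..n] with P i (0 if none) — the value of A's descending first-match scans
def pvDescMax (P : Nat → Bool) : Nat → Int
  | 0 => 0
  | k+1 => if P (k+1) then ((k : Int) + 1) else pvDescMax P k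

theorem pv_join_snoc (j w : List Char) : ∀ (ys : List (List Char)), ys ≠ [] →
    PySem.Chars.join j (ys ++ [w]) = PySem.Chars.join j ys ++ j ++ w := by
  intro ys
  induction ys with
  | nil => intro h; exact absurd rfl h
  | cons x rest ih =>
    intro _
    cases rest with
    | nil => simp [PySem.Chars.join_cons_cons, PySem.Chars.join_singleton]
    | cons y rest' =>
      have := ih (by simp)
      simp only [List.cons_append, PySem.Chars.join_cons_cons] at this ⊢
      rw [this]; simp [List.append_assoc]

theorem pv_prefix_step (j : List Char) (cws : List (List Char)) (k : Nat) :
    PySem.Chars.join j (cws.take k) <+: PySem.Chars.join j (cws.take (k+1)) := by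
  by_cases hk : k < cws.length
  · have htake : cws.take (k+1) = cws.take k ++ [cws[k]] := by
      rw [List.take_add_one]
      simp [List.getElem?_eq_getElem hk]
    rw [htake]
    cases hkz : cws.take k with
    | nil => simp [PySem.Chars.join_singleton, PySem.Chars.join_nil]
    | cons a b =>
      rw [← hkz, pv_join_snoc j _ _ (by simp [hkz])]
      rw [List.append_assoc]
      exact List.prefix_append _ _
  · have h1 : cws.take k = cws := List.take_of_length_le (by omega)
    have h2 : cws.take (k+1) = cws := List.take_of_length_le (by omega)
    rw [h1, h2]

theorem pv_ok_mono (msw : Bool) (t l l' : List Char) (h : l' <+: l) (hl : pvOk msw t l = true) :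
    pvOk msw t l' = true := by
  cases msw
  · simp [pvOk, PySem.Chars.isIn_iff_infix] at hl ⊢
    exact h.isInfix.trans hl
  · simp [pvOk, PySem.Chars.startswith_iff] at hl ⊢
    exact h.trans hl

theorem pv_Pf_mono (t j : List Char) (msw : Bool) (cws : List (List Char)) :
    ∀ k' k, k ≤ k' → pvPf t j msw cws k' = true → pvPf t j msw cws k = true := by
  intro k'
  induction k' with
  | zero => intro k hk h
            have : k = 0 := by omega
            rw [this]; exact h
  | succ n ih =>
    intro k hk h
    rcases Nat.lt_or_ge k (n+1) with hlt | hge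
    · exact ih k (by omega) (pv_ok_mono msw t _ _ (pv_prefix_step j cws n) h)
    · have : k = n + 1 := by omega
      rw [this]; exact h

theorem pvDescMax_all (P : Nat → Bool) : ∀ n, (∀ i, 1 ≤ i → i ≤ n → P i = true) →
    pvDescMax P n = (n : Int) := by
  intro n
  induction n with
  | zero => intro _; rfl
  | succ n ih =>
    intro h
    simp [pvDescMax, h (n+1) (by omega) (by omega)]

theorem pvDescMax_ext (P : Nat → Bool) : ∀ n k, k ≤ n → (∀ i, k < i → i ≤ n → P i = false) →
    pvDescMax P n = pvDescMax P k := by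
  intro n
  induction n with
  | zero => intro k hk _; have : k = 0 := by omega
            rw [this]
  | succ n ih =>
    intro k hk h
    rcases Nat.lt_or_ge k (n+1) with hlt | hge
    · have hfalse : P (n+1) = false := h (n+1) (by omega) (by omega)
      simp only [pvDescMax, hfalse, Bool.false_eq_true, if_false]
      exact ih k (by omega) (fun i h1 h2 => h i h1 (by omega))
    · have : k = n + 1 := by omega
      rw [this]

-- A's loop bodies as a single pvOk test
theorem wITRS_loop1_cons (words : List String) (tc j : String) (msw : Bool) (i : Int) (rest : List Int) (r : Int) :
    wITRS_loop1 words tc j msw (i :: rest) r =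
      if pvOk msw tc.toList (PySem.Str.join j (PySem.List.slice words (some 0) (some i))).toList && decide (r < i) then i
      else wITRS_loop1 words tc j msw rest r := by
  cases msw <;>
    simp [wITRS_loop1, pvOk, PySem.Str.startswith_eq, PySem.Str.isIn_eq]

theorem wITRS_loop2_cons (words : List String) (tc j : String) (msw : Bool) (i : Int) (rest : List Int) (r : Int) :
    wITRS_loop2 words tc j msw (i :: rest) r =
      if pvOk msw tc.toList (PySem.Str.join j (PySem.List.slice words (some (-i)) (some ((words.length : Int))))).toList && decide (r < i) then i
      else wITRS_loop2 words tc j msw rest r := by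
  cases msw <;>
    simp [wITRS_loop2, pvOk, PySem.Str.startswith_eq, PySem.Str.isIn_eq]

theorem pv_slice_neg_full {α : Type} (xs : List α) (i : Nat) (hi : 0 < i) :
    PySem.List.slice xs (some (-(i : Int))) (some ((xs.length : Int))) = xs.drop (xs.length - i) := by
  simp [PySem.List.slice, PySem.List.clampIdx_neg_natCast _ _ hi]

theorem aLoop1_eq (words : List String) (tc j : String) (msw : Bool) : ∀ k : Nat,
    wITRS_loop1 words tc j msw (PySem.List.pyRange (k : Int) (-1) (-1)) 0
      = pvDescMax (pvPf tc.toList j.toList msw (words.map String.toList)) k := by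
  intro k
  induction k with
  | zero =>
    rw [show ((0 : Nat) : Int) = 0 by norm_num]
    rw [PySem.List.pyRange_neg_one_cons (by norm_num),
        PySem.List.pyRange_neg_one_eq_nil (by norm_num)]
    rw [wITRS_loop1_cons]
    simp [wITRS_loop1, pvDescMax]
  | succ k ih =>
    rw [show ((k + 1 : Nat) : Int) = (k : Int) + 1 by push_cast; ring]
    rw [PySem.List.pyRange_neg_one_cons (by omega)]
    rw [show ((k : Int) + 1 - 1) = (k : Int) by ring]
    rw [wITRS_loop1_cons]
    have hline : (PySem.Str.join j (PySem.List.slice words (some 0) (some ((k : Int) + 1)))).toList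
        = PySem.Chars.join j.toList ((words.map String.toList).take (k + 1)) := by
      rw [PySem.Str.toList_join, PySem.List.slice_zero_start,
          show ((k : Int) + 1) = ((k + 1 : Nat) : Int) by push_cast; ring,
          PySem.List.slice_to_natCast, List.map_take]
    rw [hline]
    by_cases hP : pvOk msw tc.toList (PySem.Chars.join j.toList ((words.map String.toList).take (k + 1))) = true
    · rw [if_pos (by rw [hP]; simp)]
      simp [pvDescMax, pvPf, hP]
    · rw [Bool.not_eq_true] at hP
      rw [if_neg (by rw [hP]; simp)]
      rw [ih]
      simp [pvDescMax, pvPf, hP]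

theorem aLoop2_eq (words : List String) (tc j : String) (msw : Bool) : ∀ k : Nat, k ≤ words.length →
    wITRS_loop2 words tc j msw (PySem.List.pyRange (k : Int) (-1) (-1)) 0
      = pvDescMax (pvPs tc.toList j.toList msw (words.map String.toList)) k := by
  intro k
  induction k with
  | zero =>
    intro _
    rw [show ((0 : Nat) : Int) = 0 by norm_num]
    rw [PySem.List.pyRange_neg_one_cons (by norm_num),
        PySem.List.pyRange_neg_one_eq_nil (by norm_num)]
    rw [wITRS_loop2_cons]
    simp [wITRS_loop2, pvDescMax]
  | succ k ih =>
    intro hk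
    rw [show ((k + 1 : Nat) : Int) = (k : Int) + 1 by push_cast; ring]
    rw [PySem.List.pyRange_neg_one_cons (by omega)]
    rw [show ((k : Int) + 1 - 1) = (k : Int) by ring]
    rw [wITRS_loop2_cons]
    have hline : (PySem.Str.join j (PySem.List.slice words (some (-((k : Int) + 1))) (some ((words.length : Int))))).toList
        = PySem.Chars.join j.toList ((words.map String.toList).drop (words.length - (k + 1))) := by
      rw [PySem.Str.toList_join,
          show (-((k : Int) + 1)) = (-((k + 1 : Nat) : Int)) by push_cast; ring,
          pv_slice_neg_full words (k + 1) (by omega), List.map_drop]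
    rw [hline]
    by_cases hP : pvOk msw tc.toList (PySem.Chars.join j.toList ((words.map String.toList).drop (words.length - (k + 1)))) = true
    · rw [if_pos (by rw [hP]; simp)]
      simp [pvDescMax, pvPs, hP]
    · rw [Bool.not_eq_true] at hP
      rw [if_neg (by rw [hP]; simp)]
      rw [ih (by omega)]
      simp [pvDescMax, pvPs, hP]

theorem pvFwd_inv (t j : List Char) (msw : Bool) (cws : List (List Char)) :
    ∀ m k, k + m = cws.length → (∀ i, 1 ≤ i → i ≤ k → pvPf t j msw cws i = true) →
    pvFwd t j msw (cws.drop k) (k + 1) (PySem.Chars.join j (cws.take k)) (k : Int)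
      = pvDescMax (pvPf t j msw cws) cws.length := by
  intro m
  induction m with
  | zero =>
    intro k hk hall
    have hdrop : cws.drop k = [] := by rw [List.drop_eq_nil_iff]; omega
    rw [hdrop]
    simp only [pvFwd]
    rw [pvDescMax_all _ cws.length (fun i h1 h2 => hall i h1 (by omega))]
    omega
  | succ m ih =>
    intro k hk hall
    have hklt : k < cws.length := by omega
    have hdrop : cws.drop k = cws[k] :: cws.drop (k + 1) := List.drop_eq_getElem_cons hklt
    rw [hdrop]
    simp only [pvFwd]
    have hline : (if (k + 1) == 1 then cws[k] else PySem.Chars.join j (cws.take k) ++ j ++ cws[k])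
        = PySem.Chars.join j (cws.take (k + 1)) := by
      have htake : cws.take (k + 1) = cws.take k ++ [cws[k]] := by
        rw [List.take_add_one]; simp [List.getElem?_eq_getElem hklt]
      cases k with
      | zero => simp [htake, PySem.Chars.join_singleton]
      | succ k' =>
        rw [if_neg (by simp)]
        rw [htake, pv_join_snoc j _ _ (by
          have hlt : (cws.take (k' + 1)).length = k' + 1 := by
            rw [List.length_take]; omega
          intro hnil; rw [hnil] at hlt; simp at hlt)]
    rw [hline]
    by_cases hP : pvPf t j msw cws (k + 1) = true
    · have : pvOk msw t (PySem.Chars.join j (cws.take (k + 1))) = true := hP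
      rw [this]
      simp only [Bool.not_true, Bool.false_eq_true, if_false]
      have := ih (k + 1) (by omega)
        (fun i h1 h2 => by
          rcases Nat.lt_or_ge i (k + 1) with h | h
          · exact hall i h1 (by omega)
          · have : i = k + 1 := by omega
            rw [this]; exact hP)
      exact_mod_cast this
    · have hPf : pvOk msw t (PySem.Chars.join j (cws.take (k + 1))) = false := by
        rw [Bool.not_eq_true] at hP; exact hP
      rw [hPf]
      simp only [Bool.not_false, if_true]
      have hhigh : ∀ i, k < i → i ≤ cws.length → pvPf t j msw cws i = false := by
        intro i h1 h2
        by_contra hcon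
        rw [Bool.not_eq_false] at hcon
        exact hP (pv_Pf_mono t j msw cws i (k + 1) (by omega) hcon)
      rw [pvDescMax_ext _ cws.length k (by omega) hhigh,
          pvDescMax_all _ k (fun i h1 h2 => hall i h1 h2)]
  termination_by m => m

theorem pvBwd_inv (t j : List Char) (msw : Bool) (cws : List (List Char)) :
    ∀ m k, k + m = cws.length →
    pvBwd t j msw (cws.reverse.drop k) (k + 1) (PySem.Chars.join j (cws.drop (cws.length - k)))
        (pvDescMax (pvPs t j msw cws) k)
      = pvDescMax (pvPs t j msw cws) cws.length := by
  intro m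
  induction m with
  | zero =>
    intro k hk
    have hdrop : cws.reverse.drop k = [] := by
      rw [List.drop_eq_nil_iff]; simp only [List.length_reverse]; omega
    rw [hdrop]
    simp only [pvBwd]
    have : k = cws.length := by omega
    rw [this]
  | succ m ih =>
    intro k hk
    have hklt : k < cws.reverse.length := by simp; omega
    have hdrop : cws.reverse.drop k = cws.reverse[k] :: cws.reverse.drop (k + 1) :=
      List.drop_eq_getElem_cons hklt
    rw [hdrop]
    simp only [pvBwd]
    have hw : cws.reverse[k] = cws[cws.length - 1 - k]'(by omega) := List.getElem_reverse hklt
    have hdrop2 : cws.drop (cws.length - (k + 1)) = cws[cws.length - 1 - k]'(by omega) :: cws.drop (cws.length - k) := by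
      have h1 : cws.length - (k + 1) < cws.length := by omega
      rw [List.drop_eq_getElem_cons h1]
      congr 1
      · congr 1; omega
      · congr 1; omega
    have hline : (if (k + 1) == 1 then cws.reverse[k] else cws.reverse[k] ++ j ++ PySem.Chars.join j (cws.drop (cws.length - k)))
        = PySem.Chars.join j (cws.drop (cws.length - (k + 1))) := by
      cases k with
      | zero =>
        rw [if_pos (by decide), hw, hdrop2]
        have hnil : cws.drop (cws.length - 0) = [] := by rw [List.drop_eq_nil_iff]; omega
        rw [hnil, PySem.Chars.join_singleton]
      | succ k' =>
        rw [if_neg (by simp), hw, hdrop2]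
        have hlen : (cws.drop (cws.length - (k' + 1))).length = k' + 1 := by
          rw [List.length_drop]; omega
        obtain ⟨c, rest, hcr⟩ := List.exists_cons_of_ne_nil
          (by intro hnil; rw [hnil] at hlen; simp at hlen : cws.drop (cws.length - (k' + 1)) ≠ [])
        rw [hcr, PySem.Chars.join_cons_cons]
    rw [hline]
    have hbest : (if pvOk msw t (PySem.Chars.join j (cws.drop (cws.length - (k + 1)))) = true
          then ((k + 1 : Nat) : Int) else pvDescMax (pvPs t j msw cws) k)
        = pvDescMax (pvPs t j msw cws) (k + 1) := by
      simp only [pvDescMax, pvPs]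
      split_ifs with h
      · push_cast; ring
      · rfl
    have hgoal := ih (k + 1) (by omega)
    rw [← hgoal, ← hbest]
  termination_by m => m

-- ===== VERDICT (by name: the statement is the Claim_ definition above) =====
theorem wordsInARowTheSame_spec : Claim_equal_wordsInARowTheSame := by
  intro words toCompare joinString msw _
  unfold Spec_wordsInARowTheSame wordsInARowTheSame wordsInARowTheSame_alt
  dsimp only
  have htc : PySem.Chars.lower toCompare.toList = (PySem.Str.lower toCompare).toList :=
    (PySem.Str.toList_lower toCompare).symm
  rw [htc]
  set tc := PySem.Str.lower toCompare with htcdef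
  set cws := words.map String.toList with hcws
  have hn : cws.length = words.length := by simp [hcws]
  -- forward sides
  have hAf : wITRS_loop1 words tc joinString msw (PySem.List.pyRange ((words.length : Int)) (-1) (-1)) 0
      = pvDescMax (pvPf tc.toList joinString.toList msw cws) words.length :=
    aLoop1_eq words tc joinString msw words.length
  have hBf : pvFwd tc.toList joinString.toList msw cws 1 [] 0
      = pvDescMax (pvPf tc.toList joinString.toList msw cws) words.length := by
    have := pvFwd_inv tc.toList joinString.toList msw cws cws.length 0 (by omega)
      (by intro i h1 h2; omega)
    simp only [List.drop_zero, List.take_zero, PySem.Chars.join_nil, Nat.cast_zero, hn] at this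
    exact this
  -- backward sides
  have hAb : wITRS_loop2 words tc joinString msw (PySem.List.pyRange ((words.length : Int)) (-1) (-1)) 0
      = pvDescMax (pvPs tc.toList joinString.toList msw cws) words.length :=
    aLoop2_eq words tc joinString msw words.length (le_refl _)
  have hBb : pvBwd tc.toList joinString.toList msw cws.reverse 1 [] 0
      = pvDescMax (pvPs tc.toList joinString.toList msw cws) words.length := by
    have := pvBwd_inv tc.toList joinString.toList msw cws cws.length 0 (by omega)
    simp only [Nat.sub_zero, List.drop_length, PySem.Chars.join_nil, Nat.zero_add,
      pvDescMax, List.drop_zero] at this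
    simp only [hn] at this
    exact this
  rw [hAf, hBf, hAb, hBb]
  by_cases h : pvDescMax (pvPf tc.toList joinString.toList msw cws) words.length = 0 <;>
    simp [h]
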